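-- pv_equiv track=rewrite | github.com/antismash/antismash | antismash/modules/nrps_pks/signatures.py | build_position_list
-- ===== SOURCE A (Python) =====
-- def build_position_list(positions: list[int], reference_seq: str) -> list[int]:
--     """ Adjusts a list of positions to account for gaps in the reference sequence
--
--         Arguments:
--             positions: a list of ints that represent positions of interest in
--                        the reference sequence
--             reference_seq: the (aligned) reference sequence
--
--         Returns:
--             a new list of positions, each >= the original position
--     """
--     poslist = []
--     position = 0
--     for i, ref in enumerate(reference_seq):
--         if ref != "-":
--             if position in positions:
--                 poslist.append(i)
--             position += 1
--     return poslist
-- ===== SOURCE B (Python) =====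
-- def build_position_list(positions: list[int], reference_seq: str) -> list[int]:
--     """ Adjusts a list of positions to account for gaps in the reference sequence """
--     index_map = [i for i, ref in enumerate(reference_seq) if ref != "-"]
--     return [index_map[p] for p in range(len(index_map)) if p in positions]
-- ===== Notes on version B (the rewrite author's own statement) =====
-- stated objective: alternative
-- what changed: Replaces the fused loop (counter + membership check + append interleaved) by two separate passes: first a comprehension building the index table of non-gap column indices, then a comprehension selecting the wanted logical positions from that table.
import Mathlib
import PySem

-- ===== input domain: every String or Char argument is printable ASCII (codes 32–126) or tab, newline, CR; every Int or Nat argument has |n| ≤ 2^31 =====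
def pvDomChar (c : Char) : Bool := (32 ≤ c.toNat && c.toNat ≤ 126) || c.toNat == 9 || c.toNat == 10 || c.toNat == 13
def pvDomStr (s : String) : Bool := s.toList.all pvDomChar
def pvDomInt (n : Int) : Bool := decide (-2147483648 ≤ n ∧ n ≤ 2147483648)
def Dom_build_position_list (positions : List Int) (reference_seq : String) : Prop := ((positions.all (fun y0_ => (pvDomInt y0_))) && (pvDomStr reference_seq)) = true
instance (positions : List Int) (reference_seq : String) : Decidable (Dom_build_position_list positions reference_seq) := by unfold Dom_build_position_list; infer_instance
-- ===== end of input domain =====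

-- B replaces A's fused loop (gap counter + membership check + append) by two passes:
-- build the index table of non-gap columns, then select the wanted logical positions
-- from it (objective: alternative decomposition; same asymptotic cost).


-- ===== PORT A =====
-- for i, ref in enumerate(reference_seq): fused loop with counter `position` and accumulator `poslist`
def build_position_list (positions : List Int) (reference_seq : String) : List Int :=
  ((PySem.List.enumerate reference_seq.toList 0).foldl
    (fun (st : List Int × Int) (p : Int × Char) =>
      if p.2 ≠ '-' then
        (if st.2 ∈ positions then st.1 ++ [p.1] else st.1, st.2 + 1)
      else st)
    ([], 0)).1

-- ===== PORT B =====
-- index_map = [i for i, ref in enumerate(reference_seq) if ref != "-"]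
-- return [index_map[p] for p in range(len(index_map)) if p in positions]
def build_position_list_alt (positions : List Int) (reference_seq : String) : List Int :=
  let index_map : List Int :=
    (PySem.List.enumerate reference_seq.toList 0).filterMap
      (fun p => if p.2 ≠ '-' then some p.1 else none)
  ((List.range index_map.length).filter (fun (p : Nat) => decide ((p : Int) ∈ positions))).map
    (fun p => index_map.getD p 0)

-- ===== PRECONDITION & SPEC =====
def Spec_build_position_list (positions : List Int) (reference_seq : String) (out : List Int) : Prop := out = build_position_list_alt positions reference_seq
instance (positions : List Int) (reference_seq : String) (out : List Int) : Decidable (Spec_build_position_list positions reference_seq out) := by unfold Spec_build_position_list; infer_instance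

-- ===== CLAIM (what is proved, stated in full; the proofs are below) =====
def Claim_equal_build_position_list : Prop := ∀ (positions : List Int) (reference_seq : String), Dom_build_position_list positions reference_seq → Spec_build_position_list positions reference_seq (build_position_list positions reference_seq)

-- ===== LEMMAS AND PROOFS =====

/-- Select from the index table `m` the entries whose logical position (counting from `c`)
is a member of `positions`: the common denominator of the two programs. -/
def pvSel (positions : List Int) : List Int → Int → List Int
  | [], _ => []
  | x :: m, c => (if c ∈ positions then [x] else []) ++ pvSel positions m (c + 1)

lemma pvA_loop (positions : List Int) (l : List (Int × Char)) (acc : List Int) (c : Int) :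
    (l.foldl
      (fun (st : List Int × Int) (p : Int × Char) =>
        if p.2 ≠ '-' then
          (if st.2 ∈ positions then st.1 ++ [p.1] else st.1, st.2 + 1)
        else st)
      (acc, c)).1
    = acc ++ pvSel positions
        (l.filterMap (fun p => if p.2 ≠ '-' then some p.1 else none)) c := by
  induction l generalizing acc c with
  | nil => simp [pvSel]
  | cons p l ih =>
    rw [List.foldl_cons]
    by_cases hg : p.2 = '-'
    · rw [if_neg (by simp [hg])]
      rw [ih]
      simp [hg]
    · rw [if_pos hg]
      by_cases hm : c ∈ positions
      · rw [if_pos hm, ih]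
        simp [hg, hm, pvSel]
      · rw [if_neg hm, ih]
        simp [hg, hm, pvSel]

lemma pvB_loop (positions : List Int) (m : List Int) (c : Int) :
    ((List.range m.length).filter (fun (p : Nat) => decide ((c + (p : Int)) ∈ positions))).map
      (fun p => m.getD p 0) = pvSel positions m c := by
  induction m generalizing c with
  | nil => simp [pvSel]
  | cons x m ih =>
    rw [List.length_cons, List.range_succ_eq_map, List.filter_cons, List.filter_map]
    have hpred : ((List.range m.length).filter
        ((fun (p : Nat) => decide ((c + (p : Int)) ∈ positions)) ∘ Nat.succ))
        = (List.range m.length).filter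
            (fun (p : Nat) => decide (((c + 1) + (p : Int)) ∈ positions)) := by
      apply List.filter_congr
      intro p _
      simp only [Function.comp]
      have : c + ((Nat.succ p : Nat) : Int) = (c + 1) + (p : Int) := by push_cast; ring
      rw [this]
    rw [hpred]
    by_cases hm : c ∈ positions
    · simpa [hm, pvSel, List.map_map, Function.comp_def, List.getD_cons_succ,
        List.getD_cons_zero] using ih (c + 1)
    · simpa [hm, pvSel, List.map_map, Function.comp_def, List.getD_cons_succ,
        List.getD_cons_zero] using ih (c + 1)

-- ===== VERDICT (by name: the statement is the Claim_ definition above) =====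
theorem build_position_list_spec : Claim_equal_build_position_list := by
  intro positions reference_seq _
  show build_position_list positions reference_seq = build_position_list_alt positions reference_seq
  have h := pvB_loop positions
    ((PySem.List.enumerate reference_seq.toList 0).filterMap
      (fun p => if p.2 ≠ '-' then some p.1 else none)) 0
  simp only [zero_add] at h
  rw [build_position_list, pvA_loop, List.nil_append, ← h, build_position_list_alt]
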